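-- pv_equiv track=rewrite | github.com/RenzKa/sign-segmentation | demo/utils_demo.py | get_labels_start_end_time
-- ===== SOURCE A (Python) =====
-- def get_labels_start_end_time(frame_wise_labels, bg_class=["Sign"]):
--     """get list of start and end times of each interval/ segment.
--
--     Args:
--         frame_wise_labels: list of framewise labels/ predictions.
--         bg_class: list of all classes in frame_wise_labels which should be ignored
--
--     Returns:
--         labels: list of labels of the segments
--         starts: list of start times of the segments
--         ends: list of end times of the segments
--     """
--     labels = []
--     starts = []
--     ends = []
--     last_label = frame_wise_labels[0]
--     if frame_wise_labels[0] not in bg_class: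
--         labels.append(frame_wise_labels[0])
--         starts.append(0)
--     for i in range(len(frame_wise_labels)):
--         if frame_wise_labels[i] != last_label:
--             if frame_wise_labels[i] not in bg_class:
--                 labels.append(frame_wise_labels[i])
--                 starts.append(i)
--             if last_label not in bg_class:
--                 ends.append(i)
--             last_label = frame_wise_labels[i]
--     if last_label not in bg_class:
--         ends.append(i + 1)
--     return labels, starts, ends
-- ===== SOURCE B (Python) =====
-- def get_labels_start_end_time(frame_wise_labels, bg_class=["Sign"]):
--     """Cut the sequence at every label change first, then emit the non-background runs."""
--     n = len(frame_wise_labels)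
--     cuts = [0] + [i + 1 for i, (a, b) in
--                   enumerate(zip(frame_wise_labels, frame_wise_labels[1:])) if a != b] + [n]
--     labels, starts, ends = [], [], []
--     for s, e in zip(cuts, cuts[1:]):
--         if frame_wise_labels[s] not in bg_class:
--             labels.append(frame_wise_labels[s])
--             starts.append(s)
--             ends.append(e)
--     return labels, starts, ends
-- ===== Notes on version B (the rewrite author's own statement) =====
-- stated objective: alternative
-- what changed: Instead of one stateful scan tracking last_label and appending to three lists at transitions, B first computes all cut points (indices where adjacent labels differ) in a comprehension over zipped adjacent pairs, pairs consecutive cuts into runs, and then emits label/start/end for each non-background run in a second pass.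
import Mathlib
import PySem

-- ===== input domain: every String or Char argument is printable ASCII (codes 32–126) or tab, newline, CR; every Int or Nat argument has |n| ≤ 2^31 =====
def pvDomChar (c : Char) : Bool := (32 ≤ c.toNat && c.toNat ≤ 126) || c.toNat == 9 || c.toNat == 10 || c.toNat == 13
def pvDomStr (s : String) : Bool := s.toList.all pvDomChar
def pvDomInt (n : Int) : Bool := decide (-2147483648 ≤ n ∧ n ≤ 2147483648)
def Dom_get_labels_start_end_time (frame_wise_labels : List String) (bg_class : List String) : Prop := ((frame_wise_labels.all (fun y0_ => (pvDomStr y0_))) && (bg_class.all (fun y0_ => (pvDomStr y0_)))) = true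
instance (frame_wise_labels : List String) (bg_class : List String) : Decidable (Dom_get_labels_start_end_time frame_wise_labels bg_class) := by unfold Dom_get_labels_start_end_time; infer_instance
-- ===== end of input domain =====

-- B cuts the sequence at every label change first (one comprehension over adjacent pairs),
-- then emits the non-background runs; same cost as A, different decomposition ('alternative').

-- ===== PORT A =====
-- the for-loop of A: state (labels, starts, ends, last_label); j is Python's loop index i,
-- walking the remaining frames instead of re-indexing (same values at every step);
-- the [] case performs A's trailing `ends.append(i + 1)` (there j = i + 1).
def pvGoA (bg : List String) : List String → Int → String → List String → List Int → List Int → List String × List Int × List Int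
  | [], j, last, L, S, E => (L, S, if last ∈ bg then E else E ++ [j])
  | x :: xs, j, last, L, S, E =>
    if x ≠ last then
      pvGoA bg xs (j+1) x (if x ∈ bg then L else L ++ [x]) (if x ∈ bg then S else S ++ [j]) (if last ∈ bg then E else E ++ [j])
    else
      pvGoA bg xs (j+1) last L S E

def get_labels_start_end_time (frame_wise_labels : List String) (bg_class : List String) : List String × List Int × List Int :=
  match frame_wise_labels with
  | [] => ([], [], [])  -- Python raises IndexError here; excluded by Pre_
  | f0 :: _ =>
    let L := if f0 ∈ bg_class then ([] : List String) else [f0]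
    let S := if f0 ∈ bg_class then ([] : List Int) else [(0 : Int)]
    pvGoA bg_class frame_wise_labels 0 f0 L S []

-- ===== PORT B =====
def get_labels_start_end_time_alt (frame_wise_labels : List String) (bg_class : List String) : List String × List Int × List Int :=
  let n : Int := frame_wise_labels.length
  let cuts : List Int :=
    0 :: ((PySem.List.enumerate (frame_wise_labels.zip (PySem.List.slice frame_wise_labels (some 1) none)) 0).filter
            (fun p => p.2.1 != p.2.2)).map (fun p => p.1 + 1) ++ [n]
  (cuts.zip cuts.tail).foldl
    (fun (acc : List String × List Int × List Int) (p : Int × Int) =>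
      let x := PySem.List.pyGetD frame_wise_labels p.1 ""  -- in range whenever the list is nonempty (Pre_)
      if x ∈ bg_class then acc
      else (acc.1 ++ [x], acc.2.1 ++ [p.1], acc.2.2 ++ [p.2]))
    ([], [], [])

-- ===== PRECONDITION & SPEC =====
-- Pre_ excludes only the empty list, on which Python A raises IndexError (frame_wise_labels[0]).
def Pre_get_labels_start_end_time (frame_wise_labels : List String) (_bg_class : List String) : Prop :=
  frame_wise_labels ≠ []
instance (frame_wise_labels : List String) (bg_class : List String) : Decidable (Pre_get_labels_start_end_time frame_wise_labels bg_class) := by unfold Pre_get_labels_start_end_time; infer_instance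
def pvWitness_get_labels_start_end_time : List String × List String := (["run", "run", "Sign", "walk"], ["Sign"])

def Spec_get_labels_start_end_time (frame_wise_labels : List String) (bg_class : List String) (out : List String × List Int × List Int) : Prop := out = get_labels_start_end_time_alt frame_wise_labels bg_class
instance (frame_wise_labels : List String) (bg_class : List String) (out : List String × List Int × List Int) : Decidable (Spec_get_labels_start_end_time frame_wise_labels bg_class out) := by unfold Spec_get_labels_start_end_time; infer_instance

-- ===== CLAIM (what is proved, stated in full; the proofs are below) =====
def Claim_equal_get_labels_start_end_time : Prop := ∀ (frame_wise_labels : List String) (bg_class : List String), Dom_get_labels_start_end_time frame_wise_labels bg_class → Pre_get_labels_start_end_time frame_wise_labels bg_class → Spec_get_labels_start_end_time frame_wise_labels bg_class (get_labels_start_end_time frame_wise_labels bg_class)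

-- ===== LEMMAS AND PROOFS =====

-- maximal runs of equal labels: pvRuns last s j tl = the runs of last :: tl where the current
-- run has label `last`, started at index s, and j is the index of the last consumed frame.
def pvRunsEnd : String → Nat → List String → Nat
  | _, j, [] => j + 1
  | last, j, x :: xs => if x = last then pvRunsEnd last (j+1) xs else j + 1

def pvRuns : String → Nat → Nat → List String → List (String × Nat × Nat)
  | last, s, j, [] => [(last, s, j + 1)]
  | last, s, j, x :: xs =>
    if x = last then pvRuns last s (j+1) xs
    else (last, s, j + 1) :: pvRuns x (j+1) (j+1) xs

def pvRest : String → Nat → List String → List (String × Nat × Nat)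
  | _, _, [] => []
  | last, j, x :: xs => if x = last then pvRest last (j+1) xs else pvRuns x (j+1) (j+1) xs

def pvBds : String → Nat → List String → List Nat
  | _, _, [] => []
  | last, j, x :: xs => if x = last then pvBds last (j+1) xs else (j+1) :: pvBds x (j+1) xs

def pvKeep (bg : List String) (rs : List (String × Nat × Nat)) : List (String × Nat × Nat) :=
  rs.filter (fun r => decide (r.1 ∉ bg))
def pvLab (bg : List String) (rs : List (String × Nat × Nat)) : List String := (pvKeep bg rs).map (·.1)
def pvSts (bg : List String) (rs : List (String × Nat × Nat)) : List Int := (pvKeep bg rs).map (fun r => (r.2.1 : Int))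
def pvEns (bg : List String) (rs : List (String × Nat × Nat)) : List Int := (pvKeep bg rs).map (fun r => (r.2.2 : Int))

lemma pvRuns_decomp : ∀ (tl : List String) (last : String) (s j : Nat),
    pvRuns last s j tl = (last, s, pvRunsEnd last j tl) :: pvRest last j tl := by
  intro tl
  induction tl with
  | nil => intro last s j; simp [pvRuns, pvRunsEnd, pvRest]
  | cons x xs ih =>
    intro last s j
    by_cases h : x = last <;> simp [pvRuns, pvRunsEnd, pvRest, h, ih]

lemma pvGoA_eq (bg : List String) : ∀ (tl : List String) (j : Nat) (last : String) (L : List String) (S E : List Int),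
    pvGoA bg tl ((j : Int) + 1) last L S E =
      (L ++ pvLab bg (pvRest last j tl),
       S ++ pvSts bg (pvRest last j tl),
       (if last ∈ bg then E else E ++ [((pvRunsEnd last j tl : Nat) : Int)]) ++ pvEns bg (pvRest last j tl)) := by
  intro tl
  induction tl with
  | nil =>
    intro j last L S E
    by_cases h : last ∈ bg <;>
      simp [pvGoA, pvRest, pvRunsEnd, pvLab, pvSts, pvEns, pvKeep, h]
  | cons x xs ih =>
    intro j last L S E
    have hcast : ((j : Int) + 1) + 1 = ((j + 1 : Nat) : Int) + 1 := by push_cast; ring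
    rw [pvGoA]
    by_cases h : x = last
    · subst h
      rw [if_neg (by simp), hcast, ih (j+1) x L S E]
      simp [pvRest, pvRunsEnd]
    · rw [if_pos h, hcast, ih (j+1) x _ _ _]
      simp only [pvRest, pvRunsEnd, if_neg h, pvRuns_decomp]
      by_cases hx : x ∈ bg <;> by_cases hl : last ∈ bg <;>
        simp [pvLab, pvSts, pvEns, pvKeep, hx, hl, List.append_assoc]

lemma pvBds_enum_eq : ∀ (tl : List String) (last : String) (j : Nat),
    ((PySem.List.enumerate ((last :: tl).zip tl) (j : Int)).filter (fun p => p.2.1 != p.2.2)).map (fun p => p.1 + 1)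
      = (pvBds last j tl).map (fun k : Nat => (k : Int)) := by
  intro tl
  induction tl with
  | nil => intro last j; simp [pvBds, PySem.List.enumerate_nil]
  | cons x xs ih =>
    intro last j
    have h1 : ((j : Int) + 1) = ((j + 1 : Nat) : Int) := by push_cast; ring
    simp only [List.zip_cons_cons, PySem.List.enumerate_cons, List.filter_cons]
    by_cases h : x = last
    · have hb : (last != x) = false := by simp [h]
      simp only [hb, Bool.false_eq_true, if_false]
      rw [h1, ih x (j+1)]
      simp [pvBds, h]
    · have hb : (last != x) = true := by simp only [bne_iff_ne]; exact fun hh => h hh.symm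
      simp only [hb, if_true, List.map_cons]
      rw [h1, ih x (j+1)]
      simp only [pvBds, if_neg h, List.map_cons]

lemma pvRuns_starts : ∀ (tl : List String) (last : String) (s j : Nat),
    (pvRuns last s j tl).map (fun r => r.2.1) = s :: pvBds last j tl := by
  intro tl
  induction tl with
  | nil => intro last s j; simp [pvRuns, pvBds]
  | cons x xs ih =>
    intro last s j
    by_cases h : x = last
    · simp [pvRuns, pvBds, h, ih last s (j+1)]
    · simp [pvRuns, pvBds, h, ih x (j+1) (j+1)]

lemma pvRuns_ends : ∀ (tl : List String) (last : String) (s j : Nat),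
    (pvRuns last s j tl).map (fun r => r.2.2) = pvBds last j tl ++ [j + tl.length + 1] := by
  intro tl
  induction tl with
  | nil => intro last s j; simp [pvRuns, pvBds]
  | cons x xs ih =>
    intro last s j
    have harith : (j + 1) + xs.length + 1 = j + (x :: xs).length + 1 := by simp; omega
    by_cases h : x = last
    · simp only [pvRuns, pvBds, if_pos h, ih last s (j+1), harith]
    · simp only [pvRuns, pvBds, if_neg h, List.map_cons, ih x (j+1) (j+1), harith, List.cons_append]

lemma pvRuns_label_lookup (fw : List String) : ∀ (tl : List String) (last : String) (s j : Nat),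
    fw.getD s "" = last → tl = fw.drop (j + 1) →
    ∀ r ∈ pvRuns last s j tl, fw.getD r.2.1 "" = r.1 := by
  intro tl
  induction tl with
  | nil =>
    intro last s j hs _ r hr
    simp [pvRuns] at hr
    subst hr; exact hs
  | cons x xs ih =>
    intro last s j hs hdrop r hr
    have h0 : (fw.drop (j+1))[0]? = some x := by rw [← hdrop]; rfl
    rw [List.getElem?_drop] at h0
    have hx : fw.getD (j + 1) "" = x := by
      simp only [Nat.add_zero] at h0
      simp [List.getD_eq_getElem?_getD, h0]
    have hxs : xs = fw.drop (j + 1 + 1) := by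
      have h2 : fw.drop (j + 1 + 1) = (fw.drop (j+1)).drop 1 := by rw [List.drop_drop]
      rw [h2, ← hdrop]; simp
    by_cases h : x = last
    · subst h
      have hr' : r ∈ pvRuns x s (j+1) xs := by simpa [pvRuns] using hr
      exact ih x s (j+1) hs hxs r hr'
    · have hr' : r = (last, s, j+1) ∨ r ∈ pvRuns x (j+1) (j+1) xs := by
        simpa [pvRuns, h] using hr
      rcases hr' with hr' | hr'
      · subst hr'; exact hs
      · exact ih x (j+1) (j+1) hx hxs r hr'

lemma pvZip_trunc {α β γ : Type} (st : α → β) (en : α → γ) (a : β) : ∀ (rs : List α),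
    ((rs.map st) ++ [a]).zip (rs.map en) = rs.map (fun r => (st r, en r)) := by
  intro rs
  induction rs with
  | nil => simp
  | cons r rest ih => simp [ih]

lemma pvFoldB_eq (fw bg : List String) : ∀ (rs : List (String × Nat × Nat)) (L : List String) (S E : List Int),
    (∀ r ∈ rs, fw.getD r.2.1 "" = r.1) →
    (rs.map (fun r => ((r.2.1 : Int), (r.2.2 : Int)))).foldl
      (fun (acc : List String × List Int × List Int) (p : Int × Int) =>
        let x := PySem.List.pyGetD fw p.1 ""
        if x ∈ bg then acc
        else (acc.1 ++ [x], acc.2.1 ++ [p.1], acc.2.2 ++ [p.2])) (L, S, E)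
      = (L ++ pvLab bg rs, S ++ pvSts bg rs, E ++ pvEns bg rs) := by
  intro rs
  induction rs with
  | nil => intro L S E _; simp [pvLab, pvSts, pvEns, pvKeep]
  | cons r rest ih =>
    intro L S E hlook
    have hr : fw.getD r.2.1 "" = r.1 := hlook r (by simp)
    have hrest : ∀ q ∈ rest, fw.getD q.2.1 "" = q.1 := fun q hq => hlook q (by simp [hq])
    simp only [List.map_cons, List.foldl_cons]
    rw [show (PySem.List.pyGetD fw ((r.2.1 : Nat) : Int) "") = r.1 by
      rw [PySem.List.pyGetD_natCast]; exact hr]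
    by_cases hb : r.1 ∈ bg
    · rw [if_pos hb, ih L S E hrest]
      simp [pvLab, pvSts, pvEns, pvKeep, hb]
    · rw [if_neg hb, ih _ _ _ hrest]
      simp [pvLab, pvSts, pvEns, pvKeep, hb, List.append_assoc]

-- ===== VERDICT (by name: the statement is the Claim_ definition above) =====
theorem get_labels_start_end_time_spec : Claim_equal_get_labels_start_end_time := by
  intro fw bg _ hpre
  unfold Spec_get_labels_start_end_time
  match fw, hpre with
  | f0 :: tl, _ =>
    -- A side
    have hA : get_labels_start_end_time (f0 :: tl) bg =
        ((if f0 ∈ bg then ([] : List String) else [f0]) ++ pvLab bg (pvRest f0 0 tl),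
         (if f0 ∈ bg then ([] : List Int) else [(0:Int)]) ++ pvSts bg (pvRest f0 0 tl),
         (if f0 ∈ bg then ([] : List Int) else [((pvRunsEnd f0 0 tl : Nat) : Int)]) ++ pvEns bg (pvRest f0 0 tl)) := by
      show pvGoA bg (f0 :: tl) 0 f0 _ _ [] = _
      rw [pvGoA]
      simp only [ite_not]
      have := pvGoA_eq bg tl 0 f0 (if f0 ∈ bg then ([] : List String) else [f0])
        (if f0 ∈ bg then ([] : List Int) else [(0:Int)]) []
      simpa using this
    -- B side
    have hlook : ∀ r ∈ pvRuns f0 0 0 tl, (f0 :: tl).getD r.2.1 "" = r.1 :=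
      pvRuns_label_lookup (f0 :: tl) tl f0 0 0 (by simp) (by simp)
    have hB : get_labels_start_end_time_alt (f0 :: tl) bg =
        (pvLab bg (pvRuns f0 0 0 tl), pvSts bg (pvRuns f0 0 0 tl), pvEns bg (pvRuns f0 0 0 tl)) := by
      unfold get_labels_start_end_time_alt
      simp only [PySem.List.slice_from_one, List.tail_cons]
      have hbds := pvBds_enum_eq tl f0 0
      rw [Nat.cast_zero] at hbds
      rw [hbds]
      have hcuts : ((0 : Int) :: (pvBds f0 0 tl).map (fun k : Nat => (k : Int)) ++ [((f0 :: tl).length : Int)])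
          = ((pvRuns f0 0 0 tl).map (fun r => ((r.2.1 : Nat) : Int))) ++ [((f0 :: tl).length : Int)] := by
        rw [show (pvRuns f0 0 0 tl).map (fun r => ((r.2.1 : Nat) : Int))
              = List.map (fun k : Nat => (k : Int)) (List.map (fun r : String × Nat × Nat => r.2.1) (pvRuns f0 0 0 tl)) from (List.map_map).symm]
        rw [pvRuns_starts]
        simp
      have htail : ((0 : Int) :: (pvBds f0 0 tl).map (fun k : Nat => (k : Int)) ++ [((f0 :: tl).length : Int)]).tail
          = (pvRuns f0 0 0 tl).map (fun r => ((r.2.2 : Nat) : Int)) := by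
        rw [show (pvRuns f0 0 0 tl).map (fun r => ((r.2.2 : Nat) : Int))
              = List.map (fun k : Nat => (k : Int)) (List.map (fun r : String × Nat × Nat => r.2.2) (pvRuns f0 0 0 tl)) from (List.map_map).symm]
        rw [pvRuns_ends]
        simp [List.length_cons]
      rw [htail, hcuts, pvZip_trunc]
      rw [show (pvRuns f0 0 0 tl).map (fun r => (((r.2.1 : Nat) : Int), ((r.2.2 : Nat) : Int)))
            = (pvRuns f0 0 0 tl).map (fun r => ((r.2.1 : Int), (r.2.2 : Int))) by rfl]
      have := pvFoldB_eq (f0 :: tl) bg (pvRuns f0 0 0 tl) [] [] [] hlook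
      simpa using this
    rw [hA, hB, pvRuns_decomp tl f0 0 0]
    by_cases hb : f0 ∈ bg <;> simp [pvLab, pvSts, pvEns, pvKeep, hb]
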